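-- pv_equiv track=rewrite | github.com/kamaldev-hub/poemify | app.py | analyze_rhyme_scheme
-- ===== SOURCE A (Python) =====
-- def analyze_rhyme_scheme(poem):
--     last_words = [line.split()[-1].lower() for line in poem if line.split()]
--     rhyme_scheme = ""
--     rhyme_dict = {}
--     current_letter = 'A'
--     for word in last_words:
--         if word not in rhyme_dict:
--             rhyme_dict[word] = current_letter
--             current_letter = chr(ord(current_letter) + 1)
--         rhyme_scheme += rhyme_dict[word]
--     return rhyme_scheme
-- ===== SOURCE B (Python) =====
-- def analyze_rhyme_scheme(poem):
--     last_words = [line.split()[-1].lower() for line in poem if line.split()]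
--     return ''.join(
--         chr(ord('A') + len(set(last_words[:last_words.index(w)])))
--         for w in last_words)
-- ===== Notes on version B (the rewrite author's own statement) =====
-- stated objective: alternative
-- what changed: Removes A's running state entirely (mutating rhyme_dict and a letter counter): B is stateless, computing each letter independently as ord('A') plus the number of distinct last-words strictly before that word's first occurrence, via index/slice/set per element.
import Mathlib
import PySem

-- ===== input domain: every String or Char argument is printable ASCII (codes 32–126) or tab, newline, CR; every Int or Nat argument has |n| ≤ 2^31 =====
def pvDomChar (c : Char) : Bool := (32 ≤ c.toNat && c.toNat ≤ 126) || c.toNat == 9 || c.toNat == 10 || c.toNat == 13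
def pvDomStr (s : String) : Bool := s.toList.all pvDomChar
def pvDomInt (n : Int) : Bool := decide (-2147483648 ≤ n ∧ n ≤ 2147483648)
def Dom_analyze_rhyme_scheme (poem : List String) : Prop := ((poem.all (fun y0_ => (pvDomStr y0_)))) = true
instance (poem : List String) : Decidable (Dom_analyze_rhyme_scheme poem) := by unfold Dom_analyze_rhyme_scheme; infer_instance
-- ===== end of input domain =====

-- B is stateless: instead of A's fused loop mutating a dict and a letter counter, each letter is
-- computed independently as 'A' + number of distinct last-words before that word's first occurrence.

-- ===== PORT A =====
-- shared helper: the identical comprehension [line.split()[-1].lower() for line in poem if line.split()]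
-- appearing verbatim in both A and B.  split()[-1] is total here (the guard keeps split() nonempty).
def pvLastWords (poem : List String) : List String :=
  poem.filterMap (fun line =>
    let ws := PySem.Str.split₀ line
    if ws.isEmpty then none else some (PySem.Str.lower (PySem.List.pyGetD ws (-1) "")))

-- Python characters are code points: current_letter / the dict values are modelled by their
-- code points (Nat), chr at emission is Char.ofNat (exact on the reachable ASCII range).
def pvLoopA : List String → PySem.Dict String Nat → Nat → List Char → List Char
  | [], _, _, out => out
  | w :: ws, d, cl, out =>
    if d.contains w then pvLoopA ws d cl (out ++ [Char.ofNat (d.getD w 0)])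
    else
      let d' := d.insert w cl
      pvLoopA ws d' (cl + 1) (out ++ [Char.ofNat (d'.getD w 0)])

def analyze_rhyme_scheme (poem : List String) : String :=
  String.mk (pvLoopA (pvLastWords poem) PySem.Dict.empty 65 [])

-- ===== PORT B =====
def analyze_rhyme_scheme_alt (poem : List String) : String :=
  let last_words := pvLastWords poem
  -- last_words.index(w): ValueError unreachable (w is drawn from last_words), ported as getD 0
  String.mk (last_words.map (fun w =>
    let j : Nat := (PySem.List.index? last_words w).getD 0
    Char.ofNat (65 + (PySem.Set.ofList (PySem.List.slice last_words none (some (j : Int)))).length)))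

-- ===== PRECONDITION & SPEC =====
def Spec_analyze_rhyme_scheme (poem : List String) (out : String) : Prop := out = analyze_rhyme_scheme_alt poem
instance (poem : List String) (out : String) : Decidable (Spec_analyze_rhyme_scheme poem out) := by unfold Spec_analyze_rhyme_scheme; infer_instance

-- ===== CLAIM (what is proved, stated in full; the proofs are below) =====
def Claim_equal_analyze_rhyme_scheme : Prop := ∀ (poem : List String), Dom_analyze_rhyme_scheme poem → Spec_analyze_rhyme_scheme poem (analyze_rhyme_scheme poem)

-- ===== LEMMAS AND PROOFS =====

-- the common mathematical value: letter of w = 65 + index of w among the distinct last-words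
def pvSpecF : List String → List String → List Char
  | [], _ => []
  | w :: ws, seen =>
    if w ∈ seen then Char.ofNat (65 + seen.idxOf w) :: pvSpecF ws seen
    else Char.ofNat (65 + seen.length) :: pvSpecF ws (seen ++ [w])

theorem pvLoopA_spec (ws : List String) : ∀ (d : PySem.Dict String Nat) (seen : List String)
    (out : List Char), seen.Nodup →
    (∀ w, d.contains w = decide (w ∈ seen)) →
    (∀ w ∈ seen, d.getD w 0 = 65 + seen.idxOf w) →
    pvLoopA ws d (65 + seen.length) out = out ++ pvSpecF ws seen := by
  induction ws with
  | nil => intro d seen out _ _ _; simp [pvLoopA, pvSpecF]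
  | cons w ws ih =>
    intro d seen out hnd hc hg
    by_cases hmem : w ∈ seen
    · rw [pvLoopA, pvSpecF]
      simp only [hc, hmem, decide_true, if_true, hg w hmem]
      rw [ih d seen _ hnd hc hg]
      simp
    · rw [pvLoopA, pvSpecF]
      simp only [hc, hmem, decide_false, if_false, Bool.false_eq_true]
      have hgd : (d.insert w (65 + seen.length)).getD w 0 = 65 + seen.length :=
        PySem.Dict.getD_insert_self d w (65 + seen.length) 0
      rw [hgd]
      have h1 : 65 + seen.length + 1 = 65 + (seen ++ [w]).length := by simp; omega
      rw [h1, ih (d.insert w (65 + seen.length)) (seen ++ [w]) _ (by simp [List.nodup_append, hnd]; exact fun a ha h => hmem (h ▸ ha))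
        (fun w' => by
          rw [PySem.Dict.contains_insert]
          by_cases h : w' = w
          · simp [h]
          · simp [h, hc w'])
        (fun w' hw' => by
          rw [PySem.Dict.getD_insert]
          by_cases h : w' = w
          · subst h; simp [List.idxOf_append, hmem]
          · have hw'' : w' ∈ seen := by
              rcases List.mem_append.mp hw' with h' | h'
              · exact h'
              · simp at h'; exact absurd h' h
            simp [h, hg w' hw'', List.idxOf_append, hw''])]
      simp

-- pvSpecF against the global ordered distinct list (PySem.Set.update seen ws)
theorem pvSpecF_eq_map (ws : List String) : ∀ (seen : List String), seen.Nodup →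
    pvSpecF ws seen
      = ws.map (fun w => Char.ofNat (65 + (PySem.Set.update seen ws).idxOf w)) := by
  induction ws with
  | nil => intro seen _; simp [pvSpecF]
  | cons w ws ih =>
    intro seen hnd
    rw [pvSpecF, PySem.Set.update_cons]
    by_cases hmem : w ∈ seen
    · rw [if_pos hmem, PySem.Set.add_of_mem hmem, ih seen hnd]
      have hpre := PySem.Set.update_eq_append_filter seen ws
      have : (PySem.Set.update seen ws).idxOf w = seen.idxOf w := by
        rw [hpre, List.idxOf_append, if_pos hmem]
      simp [this]
    · rw [if_neg hmem, PySem.Set.add_of_not_mem hmem,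
        ih (seen ++ [w]) (by simp [List.nodup_append, hnd]; exact fun a ha h => hmem (h ▸ ha))]
      have hpre := PySem.Set.update_eq_append_filter (seen ++ [w]) ws
      have : (PySem.Set.update (seen ++ [w]) ws).idxOf w = seen.length := by
        rw [hpre, List.idxOf_append, if_pos (by simp), List.idxOf_append, if_neg hmem]
        simp [List.idxOf]
      simp [this]

-- B's value at w: index of w among the distinct elements of ws = number of distinct
-- elements strictly before w's first occurrence in ws
theorem pvIdxOf_ofList_eq (ws : List String) (w : String) (j : Nat)
    (hj : PySem.List.index? ws w = some j) :
    (PySem.Set.ofList ws).idxOf w = (PySem.Set.ofList (ws.take j)).length := by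
  obtain ⟨pre, suf, hsplit, hlen, hpre⟩ := (PySem.List.index?_eq_some_iff ws w j).mp hj
  subst hsplit
  have htake : (pre ++ w :: suf).take j = pre := by
    rw [← hlen]; exact List.take_left
  rw [htake, PySem.Set.ofList_append, PySem.Set.update_cons,
    PySem.Set.add_of_not_mem (by rw [PySem.Set.mem_ofList]; exact hpre)]
  have hfil := PySem.Set.update_eq_append_filter (PySem.Set.ofList pre ++ [w]) suf
  rw [hfil, List.idxOf_append, if_pos (by simp), List.idxOf_append,
    if_neg (by rw [PySem.Set.mem_ofList]; exact hpre)]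
  simp [List.idxOf]

-- ===== VERDICT (by name: the statement is the Claim_ definition above) =====
theorem analyze_rhyme_scheme_spec : Claim_equal_analyze_rhyme_scheme := by
  intro poem _
  unfold Spec_analyze_rhyme_scheme analyze_rhyme_scheme analyze_rhyme_scheme_alt
  have h0 : (65 : Nat) = 65 + ([] : List String).length := by simp
  rw [h0, pvLoopA_spec (pvLastWords poem) PySem.Dict.empty [] [] (by simp)
      (fun w => by simp [PySem.Dict.contains_empty]) (by simp)]
  rw [pvSpecF_eq_map (pvLastWords poem) [] (by simp)]
  congr 1
  rw [List.nil_append, PySem.Set.update_nil_left]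
  apply List.map_congr_left
  intro w hw
  obtain ⟨j, hj⟩ := Option.isSome_iff_exists.mp
    ((PySem.List.index?_isSome_iff (pvLastWords poem) w).mpr hw)
  simp only [hj, Option.getD_some, List.length_nil, Nat.add_zero]
  rw [PySem.List.slice_to_natCast, pvIdxOf_ofList_eq (pvLastWords poem) w j hj]
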